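-- pv_equiv track=rewrite | github.com/ilay32/wals-project | locator.py | like
-- ===== SOURCE A (Python) =====
-- def like(str1,str2,strict=True):
--     for sub1 in str1.split(" "):
--         for sub2 in str2.split(" "):
--             if strict:
--                 cond = sub1.lower() == sub2.lower()
--             else:
--                 cond = (sub1 in sub2) or (sub2 in sub1)
--             if cond:
--                 return True
--     return False
-- ===== SOURCE B (Python) =====
-- def like(str1, str2, strict=True):
--     words1 = str1.split(" ")
--     words2 = str2.split(" ")
--     if strict:
--         return bool({w.lower() for w in words1} & {w.lower() for w in words2})
--     return any(s1 in s2 or s2 in s1 for s1 in words1 for s2 in words2)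
-- ===== Notes on version B (the rewrite author's own statement) =====
-- stated objective: simpler
-- what changed: The strict branch's nested pairwise equality loop is replaced by a set intersection of the lowercased word sets; the substring branch becomes a direct any-expression instead of an early-return loop.
import Mathlib
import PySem

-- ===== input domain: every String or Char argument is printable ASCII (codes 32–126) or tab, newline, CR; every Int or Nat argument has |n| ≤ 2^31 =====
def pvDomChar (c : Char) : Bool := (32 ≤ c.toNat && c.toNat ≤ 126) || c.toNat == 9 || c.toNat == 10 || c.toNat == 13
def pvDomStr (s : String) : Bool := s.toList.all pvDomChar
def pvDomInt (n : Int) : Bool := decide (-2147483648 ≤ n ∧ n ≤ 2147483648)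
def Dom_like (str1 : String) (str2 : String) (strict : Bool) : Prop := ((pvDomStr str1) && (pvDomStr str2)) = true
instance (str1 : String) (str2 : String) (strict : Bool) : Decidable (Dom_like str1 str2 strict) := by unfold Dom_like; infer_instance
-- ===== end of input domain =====

-- B replaces A's nested early-return equality loop (strict) by a set intersection of the
-- lowercased word sets, and the substring branch by a direct any-expression: simpler.

-- s.split(" "): the separator is the literal " " ≠ "", so Str.split? is always `some`;
-- the `.getD []` default is never reached (exact on all inputs).
def splitSpace (s : String) : List String := (PySem.Str.split? s " ").getD []

-- ===== PORT A =====
-- inner 'for sub2 in str2.split(" ")' loop with early return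
def likeInner (sub1 : String) (w2 : List String) (strict : Bool) : Bool :=
  match w2 with
  | [] => false
  | sub2 :: rest =>
    let cond := if strict then PySem.Str.lower sub1 == PySem.Str.lower sub2
                else PySem.Str.isIn sub1 sub2 || PySem.Str.isIn sub2 sub1
    if cond then true else likeInner sub1 rest strict

-- outer 'for sub1 in str1.split(" ")' loop with early return
def likeOuter (w1 : List String) (w2 : List String) (strict : Bool) : Bool :=
  match w1 with
  | [] => false
  | sub1 :: rest =>
    if likeInner sub1 w2 strict then true else likeOuter rest w2 strict

def like (str1 : String) (str2 : String) (strict : Bool) : Bool :=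
  likeOuter (splitSpace str1) (splitSpace str2) strict

-- ===== PORT B =====
def like_alt (str1 : String) (str2 : String) (strict : Bool) : Bool :=
  let words1 := splitSpace str1
  let words2 := splitSpace str2
  if strict then
    -- bool({w.lower() for w in words1} & {w.lower() for w in words2})
    !(PySem.Set.inter (PySem.Set.ofList (words1.map PySem.Str.lower))
                      (PySem.Set.ofList (words2.map PySem.Str.lower))).isEmpty
  else
    words1.any (fun s1 => words2.any (fun s2 => PySem.Str.isIn s1 s2 || PySem.Str.isIn s2 s1))

-- ===== PRECONDITION & SPEC =====
def Spec_like (str1 : String) (str2 : String) (strict : Bool) (out : Bool) : Prop := out = like_alt str1 str2 strict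
instance (str1 : String) (str2 : String) (strict : Bool) (out : Bool) : Decidable (Spec_like str1 str2 strict out) := by unfold Spec_like; infer_instance

-- ===== CLAIM (what is proved, stated in full; the proofs are below) =====
def Claim_equal_like : Prop := ∀ (str1 : String) (str2 : String) (strict : Bool), Dom_like str1 str2 strict → Spec_like str1 str2 strict (like str1 str2 strict)

-- ===== LEMMAS AND PROOFS =====

-- A's inner loop is an 'any' over the second word list
theorem likeInner_eq_any (sub1 : String) (w2 : List String) (strict : Bool) :
    likeInner sub1 w2 strict =
      w2.any (fun sub2 => if strict then PySem.Str.lower sub1 == PySem.Str.lower sub2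
                          else PySem.Str.isIn sub1 sub2 || PySem.Str.isIn sub2 sub1) := by
  induction w2 with
  | nil => rfl
  | cons s2 t ih =>
    rw [List.any_cons, ← ih]
    simp only [likeInner]
    cases hc : (if strict = true then PySem.Str.lower sub1 == PySem.Str.lower s2
                else PySem.Str.isIn sub1 s2 || PySem.Str.isIn s2 sub1) <;> simp [hc]
    

-- A's outer loop is an 'any' of the inner loop
theorem likeOuter_eq_any (w1 w2 : List String) (strict : Bool) :
    likeOuter w1 w2 strict = w1.any (fun sub1 => likeInner sub1 w2 strict) := by
  induction w1 with
  | nil => rfl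
  | cons s1 t ih =>
    rw [List.any_cons, ← ih]
    simp only [likeOuter]
    cases hc : likeInner s1 w2 strict <;> simp [hc]

-- the intersection of the two lowercased word sets is nonempty iff some pair of words
-- has equal lowercasings
theorem inter_nonempty_iff (w1 w2 : List String) :
    (!(PySem.Set.inter (PySem.Set.ofList (w1.map PySem.Str.lower))
                       (PySem.Set.ofList (w2.map PySem.Str.lower))).isEmpty) =
      w1.any (fun a => w2.any (fun b => PySem.Str.lower a == PySem.Str.lower b)) := by
  by_cases hne : ∃ a ∈ w1, ∃ b ∈ w2, PySem.Str.lower a = PySem.Str.lower b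
  · obtain ⟨a, ha, b, hb, hab⟩ := hne
    have hmem : PySem.Str.lower a ∈
        PySem.Set.inter (PySem.Set.ofList (w1.map PySem.Str.lower))
                        (PySem.Set.ofList (w2.map PySem.Str.lower)) := by
      refine (PySem.Set.mem_inter _ _ _).2 ⟨?_, ?_⟩
      · exact (PySem.Set.mem_ofList _ _).2 (List.mem_map.2 ⟨a, ha, rfl⟩)
      · exact (PySem.Set.mem_ofList _ _).2 (List.mem_map.2 ⟨b, hb, hab.symm⟩)
    have hR : w1.any (fun a => w2.any (fun b => PySem.Str.lower a == PySem.Str.lower b)) = true :=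
      List.any_eq_true.2 ⟨a, ha, List.any_eq_true.2 ⟨b, hb, by simp [hab]⟩⟩
    have hE : (PySem.Set.inter (PySem.Set.ofList (w1.map PySem.Str.lower))
                               (PySem.Set.ofList (w2.map PySem.Str.lower))).isEmpty = false := by
      simp only [List.isEmpty_eq_false_iff]
      intro h
      rw [h] at hmem
      exact absurd hmem (List.not_mem_nil)
    rw [hR, hE]
    rfl
  · have hR : w1.any (fun a => w2.any (fun b => PySem.Str.lower a == PySem.Str.lower b)) = false := by
      rw [← Bool.not_eq_true, List.any_eq_true]
      rintro ⟨a, ha, hA⟩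
      rw [List.any_eq_true] at hA
      obtain ⟨b, hb, hab⟩ := hA
      exact hne ⟨a, ha, b, hb, beq_iff_eq.1 hab⟩
    have hnil : PySem.Set.inter (PySem.Set.ofList (w1.map PySem.Str.lower))
                                (PySem.Set.ofList (w2.map PySem.Str.lower)) = [] := by
      rw [List.eq_nil_iff_forall_not_mem]
      intro x hx
      have hx' := (PySem.Set.mem_inter _ _ _).1 hx
      rw [PySem.Set.mem_ofList, PySem.Set.mem_ofList, List.mem_map, List.mem_map] at hx'
      obtain ⟨⟨a, ha, rfl⟩, ⟨b, hb, hab⟩⟩ := hx'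
      exact hne ⟨a, ha, b, hb, hab.symm⟩
    rw [hR, hnil]
    rfl

-- ===== VERDICT (by name: the statement is the Claim_ definition above) =====
theorem like_spec : Claim_equal_like := by
  intro str1 str2 strict _
  unfold Spec_like like like_alt
  rw [likeOuter_eq_any]
  cases strict with
  | false =>
    simp only [Bool.false_eq_true, if_false]
    exact List.any_congr rfl (fun s1 => by simp [likeInner_eq_any])
  | true =>
    simp only [if_true]
    rw [inter_nonempty_iff]
    exact List.any_congr rfl (fun s1 => by simp [likeInner_eq_any])
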